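-- pv_equiv track=rewrite | github.com/proman3419/AGH-WIET-INF-WDI-2020 | 6/16.py | find_targets
-- ===== SOURCE A (Python) =====
-- def find_targets(s):
--   target_vowels_cnt = 0
--   target_ord_sum = 0
--   for ch in s:
--     if ch in vowels:
--       target_vowels_cnt += 1
--     target_ord_sum += ord(ch)
--
--   return (target_vowels_cnt, target_ord_sum)
--
-- vowels = 'aeiouy'
-- ===== SOURCE B (Python) =====
-- def find_targets(s):
--   freq = {}
--   for ch in s:
--     freq[ch] = freq.get(ch, 0) + 1
--   target_vowels_cnt = sum(freq.get(v, 0) for v in vowels)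
--   target_ord_sum = sum(ord(ch) * k for ch, k in freq.items())
--   return (target_vowels_cnt, target_ord_sum)
--
-- vowels = 'aeiouy'
-- ===== Notes on version B (the rewrite author's own statement) =====
-- stated objective: alternative
-- what changed: Builds a character-frequency dictionary in one pass, then reads both answers off the dictionary: the vowel count as the sum of the six vowels' frequencies and the ord sum as sum of ord(ch)*count over distinct characters, instead of A's fused per-character accumulation.
import Mathlib
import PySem

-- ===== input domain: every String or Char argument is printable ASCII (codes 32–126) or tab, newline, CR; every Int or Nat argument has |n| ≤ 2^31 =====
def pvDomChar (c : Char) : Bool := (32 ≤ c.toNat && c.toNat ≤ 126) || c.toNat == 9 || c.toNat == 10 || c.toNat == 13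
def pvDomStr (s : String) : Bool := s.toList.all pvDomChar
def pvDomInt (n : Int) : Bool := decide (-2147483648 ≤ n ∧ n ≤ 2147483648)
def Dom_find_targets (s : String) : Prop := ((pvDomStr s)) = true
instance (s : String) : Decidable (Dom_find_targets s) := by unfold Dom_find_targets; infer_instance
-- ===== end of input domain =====

-- B builds a character-frequency dictionary once and reads both answers (vowel count and ord sum) off it, instead of A's fused per-character accumulation; objective: alternative.


-- ===== PORT A =====
-- the module-level global `vowels = 'aeiouy'`
def pvVowels : List Char := "aeiouy".toList

-- literal port of A: one fold over the string carrying (vowel count, ord sum)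
def find_targets (s : String) : Int × Int :=
  s.toList.foldl
    (fun acc ch =>
      ((if pvVowels.contains ch then acc.1 + 1 else acc.1), acc.2 + (ch.toNat : Int)))
    (0, 0)

-- ===== PORT B =====
-- port of B: build the frequency dict (freq[ch] = freq.get(ch, 0) + 1), then
-- sum the vowels' frequencies and sum ord(ch)*k over the dict's items
def find_targets_alt (s : String) : Int × Int :=
  let freq : PySem.Dict Char Int :=
    s.toList.foldl (fun d ch => d.insert ch (d.getD ch 0 + 1)) PySem.Dict.empty
  let target_vowels_cnt : Int := pvVowels.foldl (fun a v => a + freq.getD v 0) 0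
  let target_ord_sum : Int := freq.items.foldl (fun a p => a + (p.1.toNat : Int) * p.2) 0
  (target_vowels_cnt, target_ord_sum)

-- ===== PRECONDITION & SPEC =====
def Spec_find_targets (s : String) (out : Int × Int) : Prop := out = find_targets_alt s
instance (s : String) (out : Int × Int) : Decidable (Spec_find_targets s out) := by unfold Spec_find_targets; infer_instance

-- ===== CLAIM (what is proved, stated in full; the proofs are below) =====
def Claim_equal_find_targets : Prop := ∀ (s : String), Dom_find_targets s → Spec_find_targets s (find_targets s)

-- ===== LEMMAS AND PROOFS =====

-- the fold of A, started from any accumulator, computes (vowel count, ord sum)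
theorem pv_fold_eq (l : List Char) (c o : Int) :
    l.foldl
      (fun acc ch =>
        ((if pvVowels.contains ch then acc.1 + 1 else acc.1), acc.2 + (ch.toNat : Int)))
      (c, o)
    = (c + ((l.filter (fun ch => pvVowels.contains ch)).length : Int),
       o + (l.map (fun ch => (ch.toNat : Int))).sum) := by
  induction l generalizing c o with
  | nil => simp
  | cons h tl ih =>
    simp only [List.foldl_cons, ih, List.filter_cons, List.map_cons, List.sum_cons]
    by_cases hv : h ∈ pvVowels
    · simp only [hv, List.contains_eq_mem, decide_true, if_true, List.length_cons,
        Prod.mk.injEq]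
      constructor <;> push_cast <;> ring
    · simp only [hv, List.contains_eq_mem, decide_false, if_false, Prod.mk.injEq]
      constructor <;> push_cast <;> ring

-- a sum of f k * [k = ch] over a nodup list picks out f ch (or 0 if absent)
theorem pv_sum_pick (f : Char → Int) (d : List Char) (hd : d.Nodup) (ch : Char) :
    (d.map (fun k => f k * (if ch = k then (1 : Int) else 0))).sum
      = if ch ∈ d then f ch else 0 := by
  induction d with
  | nil => simp
  | cons a d' ih =>
    rcases List.nodup_cons.mp hd with ⟨ha, hd'⟩
    simp only [List.map_cons, List.sum_cons]
    by_cases h : ch = a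
    · subst h
      have hz : (List.map (fun k => f k * if ch = k then (1 : Int) else 0) d').sum = 0 := by
        apply List.sum_eq_zero
        intro x hx
        obtain ⟨k, hk, rfl⟩ := List.mem_map.mp hx
        have hne : ¬ ch = k := by rintro rfl; exact ha hk
        rw [if_neg hne, mul_zero]
      rw [hz, if_pos rfl, mul_one, add_zero, if_pos (List.mem_cons_self ..)]
    · rw [if_neg h, mul_zero, zero_add, ih hd']
      by_cases hm : ch ∈ d'
      · rw [if_pos hm, if_pos (List.mem_cons_of_mem _ hm)]
      · rw [if_neg hm, if_neg (by simp [List.mem_cons, h, hm])]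

-- Σ_{k∈d} f k * count_l k = Σ_{x∈l} f x, when d is nodup and covers l
theorem pv_sum_count (f : Char → Int) (d : List Char) (hd : d.Nodup)
    (l : List Char) (hl : ∀ x ∈ l, x ∈ d) :
    (d.map (fun k => f k * (l.count k : Int))).sum = (l.map f).sum := by
  induction l with
  | nil => simp
  | cons ch tl ih =>
    have hcov : ∀ x ∈ tl, x ∈ d := fun x hx => hl x (List.mem_cons_of_mem _ hx)
    have hch : ch ∈ d := hl ch (List.mem_cons_self ..)
    have step : ∀ k : Char, ((ch :: tl).count k : Int)
        = (tl.count k : Int) + (if ch = k then (1 : Int) else 0) := by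
      intro k
      by_cases h : ch = k <;> simp [List.count_cons, h, beq_iff_eq]
    calc (d.map (fun k => f k * ((ch :: tl).count k : Int))).sum
        = (d.map (fun k => f k * (tl.count k : Int)
            + f k * (if ch = k then (1 : Int) else 0))).sum := by
          congr 1; apply List.map_congr_left; intro k _; rw [step k]; ring
      _ = (d.map (fun k => f k * (tl.count k : Int))).sum
            + (d.map (fun k => f k * (if ch = k then (1 : Int) else 0))).sum := by
          rw [← List.sum_map_add]
      _ = (tl.map f).sum + f ch := by
          rw [ih hcov, pv_sum_pick f d hd ch, if_pos hch]
      _ = ((ch :: tl).map f).sum := by simp; ring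

-- Σ_{v∈vowels} count_l v = number of vowels in l
theorem pv_vowel_count (l : List Char) :
    (pvVowels.map (fun v => (l.count v : Int))).sum
      = ((l.filter (fun ch => pvVowels.contains ch)).length : Int) := by
  induction l with
  | nil => simp
  | cons ch tl ih =>
    have hnd : pvVowels.Nodup := by decide
    have step : ∀ k : Char, ((ch :: tl).count k : Int)
        = (tl.count k : Int) + (if ch = k then (1 : Int) else 0) := by
      intro k
      by_cases h : ch = k <;> simp [List.count_cons, h, beq_iff_eq]
    have pick := pv_sum_pick (fun _ => (1 : Int)) pvVowels hnd ch
    simp only [one_mul] at pick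
    calc (pvVowels.map (fun v => ((ch :: tl).count v : Int))).sum
        = (pvVowels.map (fun v => (tl.count v : Int)
            + (if ch = v then (1 : Int) else 0))).sum := by
          congr 1; apply List.map_congr_left; intro k _; rw [step k]
      _ = (pvVowels.map (fun v => (tl.count v : Int))).sum
            + (pvVowels.map (fun v => (if ch = v then (1 : Int) else 0))).sum := by
          rw [← List.sum_map_add]
      _ = ((tl.filter (fun c => pvVowels.contains c)).length : Int)
            + (if ch ∈ pvVowels then (1 : Int) else 0) := by rw [ih, pick]
      _ = (((ch :: tl).filter (fun c => pvVowels.contains c)).length : Int) := by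
          by_cases h : ch ∈ pvVowels
          · simp only [List.filter_cons, List.contains_eq_mem, h, decide_true, if_true,
              List.length_cons]
            push_cast
            ring
          · simp [List.filter_cons, h]

-- ===== VERDICT (by name: the statement is the Claim_ definition above) =====
theorem find_targets_spec : Claim_equal_find_targets := by
  intro s _
  unfold Spec_find_targets find_targets find_targets_alt
  rw [pv_fold_eq, PySem.Dict.foldl_insert_getD_add_one_eq_counter]
  set l := s.toList with hl
  have hdd : (PySem.Set.ofList l).Nodup := PySem.Set.nodup_ofList l
  have hcov : ∀ x ∈ l, x ∈ PySem.Set.ofList l := fun x hx => (PySem.Set.mem_ofList ..).mpr hx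
  have h1 : List.foldl (fun a v => a + (PySem.Dict.counter l).getD v 0) 0 pvVowels
      = ((l.filter (fun ch => pvVowels.contains ch)).length : Int) := by
    rw [PySem.List.foldl_add]
    simp only [PySem.Dict.getD_counter]
    rw [pv_vowel_count l]
    ring
  have h2 : List.foldl (fun a p => a + ((p.1 : Char).toNat : Int) * p.2) 0
        (PySem.Dict.counter l).items
      = (l.map (fun ch => (ch.toNat : Int))).sum := by
    rw [PySem.Dict.items_counter, PySem.List.foldl_add, List.map_map]
    have h3 := pv_sum_count (fun c => (c.toNat : Int)) (PySem.Set.ofList l) hdd l hcov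
    simpa [Function.comp] using h3
  dsimp only
  rw [h1, h2]
  simp
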